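-- pv_equiv track=rewrite | github.com/sdkfz181tiger/ExpPython | 2026/algo_and_train/03/12/main.py | text_to_int
-- ===== SOURCE A (Python) =====
-- def text_to_int(text):
--     val = 0
--     i = 0
--     while text[i] != "#":
--         tmp = int(text[i])
--         val = val * 10 + tmp
--         i = i + 1
--     return val
-- ===== SOURCE B (Python) =====
-- def text_to_int(text):
--     chars = []
--     i = 0
--     while text[i] != "#":
--         chars.append(text[i])
--         i = i + 1
--     n = len(chars)
--     return sum(int(c) * 10 ** (n - 1 - j) for j, c in enumerate(chars))
-- ===== Notes on version B (the rewrite author's own statement) =====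
-- stated objective: alternative
-- what changed: Two phases instead of one fused loop: first collect the digit characters before '#', then compute the value positionally as a sum of digit*10^(n-1-j) over enumerate, replacing A's Horner accumulation val=val*10+digit.
import Mathlib
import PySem

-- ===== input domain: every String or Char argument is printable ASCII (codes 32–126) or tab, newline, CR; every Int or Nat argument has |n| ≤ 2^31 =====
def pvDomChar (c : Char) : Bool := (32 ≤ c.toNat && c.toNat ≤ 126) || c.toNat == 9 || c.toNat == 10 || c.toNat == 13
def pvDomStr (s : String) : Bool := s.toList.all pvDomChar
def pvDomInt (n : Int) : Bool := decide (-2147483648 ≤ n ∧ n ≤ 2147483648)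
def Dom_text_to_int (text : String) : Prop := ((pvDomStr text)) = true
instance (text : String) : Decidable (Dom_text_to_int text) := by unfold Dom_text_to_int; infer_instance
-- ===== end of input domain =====

-- B replaces A's fused Horner loop by two phases: collect digits up to '#', then a positional
-- sum digit*10^(n-1-j) over the enumerated digits (objective: alternative decomposition).

-- int(c) for a single digit character (Pre_ guarantees c is a digit)
def pvDigit (c : Char) : Int := (c.toNat : Int) - ('0'.toNat : Int)

-- ===== PORT A =====
def goA : List Char → Int → Int
  | [], val => val                 -- text[i] would raise IndexError here; excluded by Pre_
  | c :: rest, val => if c = '#' then val else goA rest (val * 10 + pvDigit c)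

def text_to_int (text : String) : Int := goA text.toList 0

-- ===== PORT B =====
def collectB : List Char → List Char
  | [] => []                       -- text[i] would raise IndexError here; excluded by Pre_
  | c :: rest => if c = '#' then [] else c :: collectB rest

def text_to_int_alt (text : String) : Int :=
  let chars := collectB text.toList
  let n : Int := (chars.length : Int)
  (PySem.List.enumerate chars).foldl
    (fun acc p => acc + pvDigit p.2 * 10 ^ ((n - 1 - p.1).toNat)) 0

-- ===== PRECONDITION & SPEC =====
-- A raises IndexError when the string has no '#', and ValueError when a character before the
-- first '#' is not a decimal digit; Pre_ admits exactly the inputs where A returns.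
def Pre_text_to_int (text : String) : Prop :=
  '#' ∈ text.toList ∧ (text.toList.takeWhile (· ≠ '#')).all (·.isDigit) = true
instance (text : String) : Decidable (Pre_text_to_int text) := by
  unfold Pre_text_to_int; infer_instance

def pvWitness_text_to_int : String := "42#x"

def Spec_text_to_int (text : String) (out : Int) : Prop := out = text_to_int_alt text
instance (text : String) (out : Int) : Decidable (Spec_text_to_int text out) := by unfold Spec_text_to_int; infer_instance

-- ===== CLAIM (what is proved, stated in full; the proofs are below) =====
def Claim_equal_text_to_int : Prop := ∀ (text : String), Dom_text_to_int text → Pre_text_to_int text → Spec_text_to_int text (text_to_int text)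

-- ===== LEMMAS AND PROOFS =====

-- positional value of a digit list (proof-only characterisation both ports meet)
def posVal : List Char → Int
  | [] => 0
  | c :: l => pvDigit c * 10 ^ l.length + posVal l

theorem goA_eq (cs : List Char) (val : Int) :
    goA cs val = val * 10 ^ (collectB cs).length + posVal (collectB cs) := by
  induction cs generalizing val with
  | nil => simp [goA, collectB, posVal]
  | cons c rest ih =>
    by_cases h : c = '#'
    · simp [goA, collectB, h, posVal]
    · rw [goA, collectB, if_neg h, if_neg h, ih]
      simp only [posVal, List.length_cons]
      ring

theorem foldB_eq (l : List Char) (n s acc : Int) (hs : s + (l.length : Int) = n) :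
    (PySem.List.enumerate l s).foldl
      (fun acc p => acc + pvDigit p.2 * 10 ^ ((n - 1 - p.1).toNat)) acc
      = acc + posVal l := by
  induction l generalizing s acc with
  | nil => simp [PySem.List.enumerate, posVal]
  | cons c rest ih =>
    have hexp : (n - 1 - s).toNat = rest.length := by
      simp only [List.length_cons] at hs; push_cast at hs; omega
    have hs' : (s + 1) + (rest.length : Int) = n := by
      simp only [List.length_cons] at hs; push_cast at hs ⊢; omega
    simp only [PySem.List.enumerate_cons, List.foldl_cons, ih _ _ hs', hexp, posVal]
    ring

theorem alt_eq_posVal (text : String) :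
    text_to_int_alt text = posVal (collectB text.toList) := by
  unfold text_to_int_alt
  rw [foldB_eq (collectB text.toList) _ 0 0 (by simp)]
  simp

-- ===== VERDICT (by name: the statement is the Claim_ definition above) =====
theorem text_to_int_spec : Claim_equal_text_to_int := by
  intro text _ _
  unfold Spec_text_to_int text_to_int
  rw [goA_eq, alt_eq_posVal]
  ring
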